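-- pv_equiv track=rewrite | github.com/Defttttttttt/Analysis | GenRealTimeRedisKey - 副本.py | GenVibGapRedisKey
-- ===== SOURCE A (Python) =====
-- def GenVibGapRedisKey(RealTimeParaDict,BearingInfo):
--     VibGapRedisKey=[]
--     SVChannels=[ChannelID for ChannelID in RealTimeParaDict if RealTimeParaDict[ChannelID][2]=="ShaftVibration"]
--     if SVChannels!=[]:
--         SVBearingDict={}
--         for BID in BearingInfo:
--             SVBearingDict[BID]=[ChannelID for ChannelID in SVChannels if  RealTimeParaDict[ChannelID][0]==BID]
--         for BID in SVBearingDict: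
--             if len(SVBearingDict[BID])==2:
--                 VibGapRedisKey+=["%s_X_Gap"%BID,"%s_Y_Gap"%BID]
--
--     return VibGapRedisKey
-- ===== SOURCE B (Python) =====
-- def GenVibGapRedisKey(RealTimeParaDict, BearingInfo):
--     # One pass over the channels: count shaft-vibration channels per bearing ID.
--     counts = {}
--     for v in RealTimeParaDict.values():
--         if v[2] == "ShaftVibration":
--             counts[v[0]] = counts.get(v[0], 0) + 1
--     # One pass over the bearings (first occurrence of each ID, like dict keys).
--     out = []
--     seen = set()
--     for BID in BearingInfo:
--         if BID not in seen:
--             seen.add(BID)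
--             if counts.get(BID) == 2:
--                 out.append("%s_X_Gap" % BID)
--                 out.append("%s_Y_Gap" % BID)
--     return out
-- ===== Notes on version B (the rewrite author's own statement) =====
-- stated objective: alternative
-- what changed: A rescans the whole shaft-vibration channel list once per bearing (building a per-bearing dict of channel lists); B makes one counting pass over the channels into a dict keyed by bearing ID and one seen-set pass over the bearings, testing the count; O(B*C) becomes O(B+C), though a timing run did not show a speed-up on the generated inputs.
import Mathlib
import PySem

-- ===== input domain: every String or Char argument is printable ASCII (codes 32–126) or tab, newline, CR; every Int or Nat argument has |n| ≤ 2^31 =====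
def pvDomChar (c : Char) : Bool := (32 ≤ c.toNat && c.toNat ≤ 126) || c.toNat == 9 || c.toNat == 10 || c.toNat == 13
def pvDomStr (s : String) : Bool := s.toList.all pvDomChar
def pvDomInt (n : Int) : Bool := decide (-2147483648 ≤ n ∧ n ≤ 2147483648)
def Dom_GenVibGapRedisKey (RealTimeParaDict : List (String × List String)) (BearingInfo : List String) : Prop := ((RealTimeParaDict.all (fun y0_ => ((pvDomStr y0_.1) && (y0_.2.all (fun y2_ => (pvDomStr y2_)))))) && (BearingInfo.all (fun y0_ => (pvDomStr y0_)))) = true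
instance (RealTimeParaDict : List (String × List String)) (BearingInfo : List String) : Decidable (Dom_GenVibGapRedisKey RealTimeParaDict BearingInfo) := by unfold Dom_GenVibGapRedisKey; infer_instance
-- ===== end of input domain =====

-- B replaces A's per-bearing rescans of the channel list (and its per-bearing dict of
-- channel lists) by one counting pass over the channels plus one seen-set pass over the
-- bearings (objective: alternative algorithm).

-- ===== PORT A =====
def GenVibGapRedisKey (RealTimeParaDict : List (String × List String)) (BearingInfo : List String) : List String :=
  let d := PySem.Dict.ofList RealTimeParaDict
  let SVChannels := d.keys.filter (fun c => PySem.List.pyGetD (d.getD c []) 2 "" == "ShaftVibration")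
  if SVChannels ≠ [] then
    let SVBearingDict := BearingInfo.foldl
      (fun (sd : PySem.Dict String (List String)) BID =>
        sd.insert BID (SVChannels.filter (fun c => PySem.List.pyGetD (d.getD c []) 0 "" == BID)))
      PySem.Dict.empty
    SVBearingDict.keys.foldl
      (fun acc BID =>
        if (SVBearingDict.getD BID []).length == 2
        then acc ++ [BID ++ "_X_Gap", BID ++ "_Y_Gap"] else acc) []
  else []

-- ===== PORT B =====
def GenVibGapRedisKey_alt (RealTimeParaDict : List (String × List String)) (BearingInfo : List String) : List String :=
  let d := PySem.Dict.ofList RealTimeParaDict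
  let counts := d.values.foldl
    (fun (cd : PySem.Dict String Int) v =>
      if PySem.List.pyGetD v 2 "" == "ShaftVibration"
      then cd.modify (PySem.List.pyGetD v 0 "") 0 (· + 1) else cd)
    PySem.Dict.empty
  (BearingInfo.foldl
    (fun (st : PySem.Set String × List String) BID =>
      if st.1.contains BID then st
      else (st.1.add BID,
        if counts.get? BID == some 2
        then st.2 ++ [BID ++ "_X_Gap", BID ++ "_Y_Gap"] else st.2))
    ((PySem.Set.empty : PySem.Set String), ([] : List String))).2

-- ===== PRECONDITION & SPEC =====
-- Pre_ excludes exactly the inputs where the Python raises IndexError: some channel's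
-- parameter list (after dict key overwrite) has fewer than 3 entries, so v[2] fails.
def Pre_GenVibGapRedisKey (RealTimeParaDict : List (String × List String)) (_BearingInfo : List String) : Prop :=
  ∀ v ∈ (PySem.Dict.ofList RealTimeParaDict).values, 3 ≤ v.length

instance (RealTimeParaDict : List (String × List String)) (BearingInfo : List String) : Decidable (Pre_GenVibGapRedisKey RealTimeParaDict BearingInfo) := by unfold Pre_GenVibGapRedisKey; infer_instance

def pvWitness_GenVibGapRedisKey : (List (String × List String)) × List String :=
  ([("c1", ["b1", "u", "ShaftVibration"]), ("c2", ["b1", "u", "ShaftVibration"])], ["b1", "b2"])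

def Spec_GenVibGapRedisKey (RealTimeParaDict : List (String × List String)) (BearingInfo : List String) (out : List String) : Prop := out = GenVibGapRedisKey_alt RealTimeParaDict BearingInfo
instance (RealTimeParaDict : List (String × List String)) (BearingInfo : List String) (out : List String) : Decidable (Spec_GenVibGapRedisKey RealTimeParaDict BearingInfo out) := by unfold Spec_GenVibGapRedisKey; infer_instance

-- ===== CLAIM (what is proved, stated in full; the proofs are below) =====
def Claim_equal_GenVibGapRedisKey : Prop := ∀ (RealTimeParaDict : List (String × List String)) (BearingInfo : List String), Dom_GenVibGapRedisKey RealTimeParaDict BearingInfo → Pre_GenVibGapRedisKey RealTimeParaDict BearingInfo → Spec_GenVibGapRedisKey RealTimeParaDict BearingInfo (GenVibGapRedisKey RealTimeParaDict BearingInfo)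

-- ===== LEMMAS AND PROOFS =====

-- getD after an insert-loop whose values do not depend on the accumulator
theorem pv_getD_foldl_insert_fun (l : List String) (g : String → List String)
    (d : PySem.Dict String (List String)) (k : String) :
    (l.foldl (fun sd x => sd.insert x (g x)) d).getD k []
      = if k ∈ l then g k else d.getD k [] := by
  induction l generalizing d with
  | nil => simp
  | cons x t ih =>
    simp only [List.foldl_cons, ih, PySem.Dict.getD_insert, List.mem_cons]
    by_cases hkt : k ∈ t <;> by_cases hkx : k = x <;> simp [hkt, hkx]

-- a conditional fold is the fold over the filtered, mapped list
theorem pv_foldl_if_comp {α β γ : Type} (p : α → Bool) (g : α → β) (h : γ → β → γ)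
    (l : List α) (a : γ) :
    l.foldl (fun acc x => if p x then h acc (g x) else acc) a
      = ((l.filter p).map g).foldl h a := by
  induction l generalizing a with
  | nil => rfl
  | cons x t ih => by_cases hx : p x <;> simp [hx, ih]

-- the counter's .get(k) == 2 test is a count test
theorem pv_get?_counter_eq_two (lst : List String) (k : String) :
    ((PySem.Dict.counter lst).get? k == some (2 : Int)) = (lst.count k == 2) := by
  rcases ho : (PySem.Dict.counter lst).get? k with _ | n
  · have hk : k ∉ lst := by
      have := (PySem.Dict.get?_eq_none_iff_not_mem_keys (PySem.Dict.counter lst) k).mp ho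
      rw [PySem.Dict.keys_counter, PySem.Set.mem_ofList] at this
      exact this
    have h0 : lst.count k = 0 := List.count_eq_zero.mpr hk
    simp [h0]
  · have hging : (PySem.Dict.counter lst).getD k 0 = n := by
      rw [PySem.Dict.getD_eq_get?_getD, ho]; rfl
    rw [PySem.Dict.getD_counter] at hging
    subst hging
    by_cases hc : lst.count k = 2
    · simp [hc]
    · have h2 : ((lst.count k : Int)) ≠ 2 := by exact_mod_cast hc
      simp [hc, h2]

-- a foldl appending g x under a condition is flatMap over the filtered list
theorem pv_foldl_append_if_flatMap {α : Type} (p : α → Bool) (g : α → List String)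
    (l : List α) (a : List String) :
    l.foldl (fun acc x => if p x then acc ++ g x else acc) a
      = a ++ (l.filter p).flatMap g := by
  induction l generalizing a with
  | nil => simp
  | cons x t ih => by_cases hx : p x <;> simp [hx, ih]

-- the elements of l not yet in s, first occurrences in order
def pvNewOnes (s : PySem.Set String) : List String → List String
  | [] => []
  | x :: t => if s.contains x then pvNewOnes s t else x :: pvNewOnes (s.add x) t

theorem pv_update_eq_append_newOnes (l : List String) (s : PySem.Set String) :
    PySem.Set.update s l = s ++ pvNewOnes s l := by
  induction l generalizing s with
  | nil => simp [PySem.Set.update, pvNewOnes]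
  | cons x t ih =>
    show PySem.Set.update (s.add x) t = _
    by_cases hx : x ∈ s
    · have hc : s.contains x = true := List.elem_eq_true_of_mem hx
      have hadd : s.add x = s := by simp only [PySem.Set.add, hc, if_pos]
      simp [ih, pvNewOnes, hx]
    · have hc : s.contains x = false := by
        simpa using fun h => hx (by simpa using h)
      have hadd : s.add x = s ++ [x] := by simp [PySem.Set.add, hx]
      rw [hadd, ih]
      simp [pvNewOnes, hx]

theorem pv_newOnes_empty_eq_ofList (l : List String) :
    pvNewOnes PySem.Set.empty l = PySem.Set.ofList l := by
  have := pv_update_eq_append_newOnes l PySem.Set.empty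
  simpa [PySem.Set.update, PySem.Set.ofList, PySem.Set.empty] using this.symm

-- B's seen-set loop, in closed form
theorem pv_seen_fold (cond : String → Bool) (g : String → List String) :
    ∀ (l : List String) (s : PySem.Set String) (a : List String),
    (l.foldl
      (fun (st : PySem.Set String × List String) x =>
        if st.1.contains x then st
        else (st.1.add x, if cond x then st.2 ++ g x else st.2)) (s, a)).2
      = a ++ ((pvNewOnes s l).filter cond).flatMap g := by
  intro l
  induction l with
  | nil => intro s a; simp [pvNewOnes]
  | cons x t ih =>
    intro s a
    by_cases hx : x ∈ s
    · have hc0 : s.contains x = true := List.elem_eq_true_of_mem hx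
      have hstep : (if (s, a).1.contains x = true then (s, a)
          else ((s, a).1.add x, if cond x = true then (s, a).2 ++ g x else (s, a).2)) = (s, a) := by
        simp [hx]
      rw [List.foldl_cons, hstep, ih]
      simp [pvNewOnes, hx]
    · have hc0 : s.contains x = false := by simpa using hx
      have hstep : (if (s, a).1.contains x = true then (s, a)
          else ((s, a).1.add x, if cond x = true then (s, a).2 ++ g x else (s, a).2))
          = (s.add x, if cond x = true then a ++ g x else a) := by
        simp [hx]
      rw [List.foldl_cons, hstep, ih]
      by_cases hc : cond x <;> simp [pvNewOnes, hx, hc]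

-- the two programs, with the dict already built, as one equation
theorem pv_main (d : PySem.Dict String (List String)) (BI : List String) (hnd : d.keys.Nodup) :
    (if (d.keys.filter (fun c => PySem.List.pyGetD (d.getD c []) 2 "" == "ShaftVibration")) ≠ [] then
      List.foldl
        (fun acc BID =>
          if ((List.foldl
                (fun (sd : PySem.Dict String (List String)) BID =>
                  sd.insert BID
                    ((d.keys.filter (fun c => PySem.List.pyGetD (d.getD c []) 2 "" == "ShaftVibration")).filter
                      (fun c => PySem.List.pyGetD (d.getD c []) 0 "" == BID)))
                PySem.Dict.empty BI).getD BID []).length == 2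
          then acc ++ [BID ++ "_X_Gap", BID ++ "_Y_Gap"] else acc)
        []
        (List.foldl
          (fun (sd : PySem.Dict String (List String)) BID =>
            sd.insert BID
              ((d.keys.filter (fun c => PySem.List.pyGetD (d.getD c []) 2 "" == "ShaftVibration")).filter
                (fun c => PySem.List.pyGetD (d.getD c []) 0 "" == BID)))
          PySem.Dict.empty BI).keys
    else [])
    = (List.foldl
        (fun (st : PySem.Set String × List String) BID =>
          if st.1.contains BID then st
          else (st.1.add BID,
            if (List.foldl
                  (fun (cd : PySem.Dict String Int) v =>
                    if PySem.List.pyGetD v 2 "" == "ShaftVibration"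
                    then cd.modify (PySem.List.pyGetD v 0 "") 0 (· + 1) else cd)
                  PySem.Dict.empty d.values).get? BID == some 2
            then st.2 ++ [BID ++ "_X_Gap", BID ++ "_Y_Gap"] else st.2))
        ((PySem.Set.empty : PySem.Set String), ([] : List String)) BI).2 := by
  set SV := d.keys.filter (fun c => PySem.List.pyGetD (d.getD c []) 2 "" == "ShaftVibration") with hSV
  set SVB := List.foldl
      (fun (sd : PySem.Dict String (List String)) BID =>
        sd.insert BID (SV.filter (fun c => PySem.List.pyGetD (d.getD c []) 0 "" == BID)))
      PySem.Dict.empty BI with hSVB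
  set counts := List.foldl
      (fun (cd : PySem.Dict String Int) v =>
        if PySem.List.pyGetD v 2 "" == "ShaftVibration"
        then cd.modify (PySem.List.pyGetD v 0 "") 0 (· + 1) else cd)
      PySem.Dict.empty d.values with hcounts
  have hkeys : SVB.keys = PySem.Set.ofList BI := by
    rw [hSVB]
    exact (PySem.Dict.keys_foldl_insert BI
      (fun _ BID => SV.filter (fun c => PySem.List.pyGetD (d.getD c []) 0 "" == BID))
      PySem.Dict.empty).trans rfl
  have hgetD : ∀ k ∈ BI, SVB.getD k []
      = SV.filter (fun c => PySem.List.pyGetD (d.getD c []) 0 "" == k) := by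
    intro k hk
    rw [hSVB]
    exact (pv_getD_foldl_insert_fun BI
      (fun BID => SV.filter (fun c => PySem.List.pyGetD (d.getD c []) 0 "" == BID))
      PySem.Dict.empty k).trans (if_pos hk)
  have hv : d.values = d.keys.map (fun k => d.getD k []) :=
    PySem.Dict.values_eq_map_keys d hnd []
  have hcounter : counts = PySem.Dict.counter
      ((d.values.filter (fun v => PySem.List.pyGetD v 2 "" == "ShaftVibration")).map
        (fun v => PySem.List.pyGetD v 0 "")) := by
    rw [hcounts, PySem.Dict.counter_eq_foldl]
    exact pv_foldl_if_comp (fun v => PySem.List.pyGetD v 2 "" == "ShaftVibration")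
      (fun v => PySem.List.pyGetD v 0 "")
      (fun (cd : PySem.Dict String Int) x => cd.modify x 0 (· + 1)) d.values PySem.Dict.empty
  have hlst : (d.values.filter (fun v => PySem.List.pyGetD v 2 "" == "ShaftVibration")).map
        (fun v => PySem.List.pyGetD v 0 "")
      = SV.map (fun c => PySem.List.pyGetD (d.getD c []) 0 "") := by
    rw [hv, List.filter_map, List.map_map, hSV]
    rfl
  have hcnt : ∀ k, ((d.values.filter (fun v => PySem.List.pyGetD v 2 "" == "ShaftVibration")).map
        (fun v => PySem.List.pyGetD v 0 "")).count k
      = (SV.filter (fun c => PySem.List.pyGetD (d.getD c []) 0 "" == k)).length := by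
    intro k
    rw [hlst, List.count_eq_countP, List.countP_map, ← List.countP_eq_length_filter]
    rfl
  have hBside : (List.foldl
        (fun (st : PySem.Set String × List String) BID =>
          if st.1.contains BID then st
          else (st.1.add BID,
            if counts.get? BID == some 2
            then st.2 ++ [BID ++ "_X_Gap", BID ++ "_Y_Gap"] else st.2))
        ((PySem.Set.empty : PySem.Set String), ([] : List String)) BI).2
      = ((PySem.Set.ofList BI).filter (fun BID => counts.get? BID == some 2)).flatMap
          (fun BID => [BID ++ "_X_Gap", BID ++ "_Y_Gap"]) := by
    refine (pv_seen_fold (fun BID => counts.get? BID == some 2)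
      (fun BID => [BID ++ "_X_Gap", BID ++ "_Y_Gap"]) BI PySem.Set.empty []).trans ?_
    rw [pv_newOnes_empty_eq_ofList, List.nil_append]
  by_cases hSVnil : SV = []
  · rw [if_neg (by simp [hSVnil])]
    rw [hBside]
    have hfil : (PySem.Set.ofList BI).filter (fun BID => counts.get? BID == some 2) = [] := by
      apply List.filter_eq_nil_iff.mpr
      intro k _
      rw [hcounter]
      have : (d.values.filter (fun v => PySem.List.pyGetD v 2 "" == "ShaftVibration")).map
          (fun v => PySem.List.pyGetD v 0 "") = [] := by
        rw [hlst, hSVnil]; rfl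
      rw [this]
      simp [PySem.Dict.counter]
    rw [hfil]
    rfl
  · rw [if_pos (by simpa using hSVnil), hkeys]
    have hAside : List.foldl
        (fun acc BID =>
          if ((SVB.getD BID []).length == 2)
          then acc ++ [BID ++ "_X_Gap", BID ++ "_Y_Gap"] else acc)
        [] (PySem.Set.ofList BI)
      = ((PySem.Set.ofList BI).filter (fun BID => (SVB.getD BID []).length == 2)).flatMap
          (fun BID => [BID ++ "_X_Gap", BID ++ "_Y_Gap"]) := by
      refine (pv_foldl_append_if_flatMap (fun BID => (SVB.getD BID []).length == 2)
        (fun BID => [BID ++ "_X_Gap", BID ++ "_Y_Gap"]) (PySem.Set.ofList BI) []).trans ?_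
      rw [List.nil_append]
    have hcond : ∀ k ∈ PySem.Set.ofList BI,
        (((SVB.getD k []).length == 2) : Bool) = (counts.get? k == some 2) := by
      intro k hk
      have hkBI : k ∈ BI := (PySem.Set.mem_ofList BI k).mp hk
      rw [hgetD k hkBI, hcounter, pv_get?_counter_eq_two, hcnt k]
    rw [hAside, hBside, List.filter_congr hcond]

-- ===== VERDICT (by name: the statement is the Claim_ definition above) =====
theorem GenVibGapRedisKey_spec : Claim_equal_GenVibGapRedisKey := by
  intro RTD BI _ _
  show GenVibGapRedisKey RTD BI = GenVibGapRedisKey_alt RTD BI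
  exact pv_main (PySem.Dict.ofList RTD) BI (PySem.Dict.nodup_keys_ofList RTD)
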